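-- pv_equiv track=rewrite | github.com/NewMediaStudio/hush-engine | tools/create_golden_set.py | categorize_row
-- ===== SOURCE A (Python) =====
-- def categorize_row(row):
--     """Categorize a row by its primary entity types."""
--     gt = row.get('ground_truth', {})
--     entity_types = set(gt.keys())
--
--     # Count how many different entity types
--     num_types = len(entity_types)
--
--     # Categorize as MIXED if 3+ entity types
--     if num_types >= 3:
--         return 'MIXED'
--
--     # Otherwise, categorize by primary entity type
--     priority = ['PERSON', 'ADDRESS', 'EMAIL', 'PHONE', 'COMPANY',
--                 'CREDIT_CARD', 'NATIONAL_ID', 'DATE_TIME']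
--     for entity_type in priority:
--         if entity_type in entity_types:
--             return entity_type
--
--     return None  # No relevant entities
-- ===== SOURCE B (Python) =====
-- def categorize_row(row):
--     """Categorize a row by its primary entity types."""
--     gt = row.get('ground_truth', {})
--     present = set(gt.keys())
--
--     # Categorize as MIXED if 3+ entity types
--     if len(present) >= 3:
--         return 'MIXED'
--
--     priority = ['PERSON', 'ADDRESS', 'EMAIL', 'PHONE', 'COMPANY',
--                 'CREDIT_CARD', 'NATIONAL_ID', 'DATE_TIME']
--     rank = {t: i for i, t in enumerate(priority)}
--
--     # Pick the present entity type of minimal rank (order-independent).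
--     best = None
--     for t in present:
--         r = rank.get(t)
--         if r is not None and (best is None or r < best):
--             best = r
--     return None if best is None else priority[best]
-- ===== Notes on version B (the rewrite author's own statement) =====
-- stated objective: alternative
-- what changed: Instead of scanning the fixed priority list for the first type present, B builds a rank table once and loops over the present entity types, keeping the minimum rank and indexing back into the priority list.
import Mathlib
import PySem

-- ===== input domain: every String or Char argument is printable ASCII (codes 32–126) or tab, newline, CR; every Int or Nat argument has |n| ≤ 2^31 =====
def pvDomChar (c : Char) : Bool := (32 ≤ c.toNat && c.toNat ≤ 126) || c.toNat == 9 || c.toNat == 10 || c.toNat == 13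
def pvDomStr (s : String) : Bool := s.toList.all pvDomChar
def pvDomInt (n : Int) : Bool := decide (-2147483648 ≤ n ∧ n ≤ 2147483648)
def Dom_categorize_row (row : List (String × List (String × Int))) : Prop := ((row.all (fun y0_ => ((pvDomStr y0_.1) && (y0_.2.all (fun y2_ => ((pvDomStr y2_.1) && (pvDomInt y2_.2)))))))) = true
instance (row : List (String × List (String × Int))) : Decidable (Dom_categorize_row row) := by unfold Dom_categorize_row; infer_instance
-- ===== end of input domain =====

-- B replaces A's first-match scan of the priority list with a rank table and a
-- minimum-rank selection over the present entity types (alternative decomposition, same cost).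


-- ===== PORT A =====
def pvPriorityA : List String :=
  ["PERSON", "ADDRESS", "EMAIL", "PHONE", "COMPANY", "CREDIT_CARD", "NATIONAL_ID", "DATE_TIME"]

-- the 'for entity_type in priority: if entity_type in entity_types: return entity_type' loop
def pvPickFirst : List String → List String → Option String
  | [], _ => none
  | t :: ts, s => if t ∈ s then some t else pvPickFirst ts s

def categorize_row (row : List (String × List (String × Int))) : Option String :=
  let gt := (PySem.Dict.mk row).getD "ground_truth" []
  let entityTypes := PySem.Set.ofList (gt.map Prod.fst)
  let numTypes := entityTypes.length
  if 3 ≤ numTypes then some "MIXED"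
  else pvPickFirst pvPriorityA entityTypes

-- ===== PORT B =====
def pvPriorityB : List String :=
  ["PERSON", "ADDRESS", "EMAIL", "PHONE", "COMPANY", "CREDIT_CARD", "NATIONAL_ID", "DATE_TIME"]

-- rank = {t: i for i, t in enumerate(priority)}
def pvRank : PySem.Dict String Int :=
  (PySem.List.enumerate pvPriorityB).foldl (fun d p => d.insert p.2 p.1) PySem.Dict.empty

-- the 'for t in present: …' min-rank loop body
def pvStepB (acc : Option Int) (t : String) : Option Int :=
  match pvRank.get? t with
  | some r =>
      match acc with
      | none => some r
      | some b => if r < b then some r else some b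
  | none => acc

def categorize_row_alt (row : List (String × List (String × Int))) : Option String :=
  let gt := (PySem.Dict.mk row).getD "ground_truth" []
  let present := PySem.Set.ofList (gt.map Prod.fst)
  if 3 ≤ present.length then some "MIXED"
  else
    -- min over the set: result is independent of the set's iteration order
    let best := present.foldl pvStepB none
    match best with
    | none => none
    | some b => PySem.List.pyGet? pvPriorityB b

-- ===== PRECONDITION & SPEC =====
def Spec_categorize_row (row : List (String × List (String × Int))) (out : Option String) : Prop := out = categorize_row_alt row
instance (row : List (String × List (String × Int))) (out : Option String) : Decidable (Spec_categorize_row row out) := by unfold Spec_categorize_row; infer_instance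

-- ===== CLAIM (what is proved, stated in full; the proofs are below) =====
def Claim_equal_categorize_row : Prop := ∀ (row : List (String × List (String × Int))), Dom_categorize_row row → Spec_categorize_row row (categorize_row row)

-- ===== LEMMAS AND PROOFS =====

-- the same step, phrased via idxOf? into an arbitrary priority list P
def pvStepN (P : List String) (acc : Option Int) (t : String) : Option Int :=
  match (List.idxOf? t P).map Int.ofNat with
  | some r =>
      match acc with
      | none => some r
      | some b => if r < b then some r else some b
  | none => acc

lemma pvRank_get (t : String) : pvRank.get? t = (List.idxOf? t pvPriorityB).map Int.ofNat := by
  have hR : pvRank = PySem.Dict.mk [("PERSON", (0 : Int)), ("ADDRESS", 1), ("EMAIL", 2),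
      ("PHONE", 3), ("COMPANY", 4), ("CREDIT_CARD", 5), ("NATIONAL_ID", 6), ("DATE_TIME", 7)] := by
    decide
  rw [hR]
  by_cases h1 : "PERSON" = t
  · subst h1; decide
  by_cases h2 : "ADDRESS" = t
  · subst h2; decide
  by_cases h3 : "EMAIL" = t
  · subst h3; decide
  by_cases h4 : "PHONE" = t
  · subst h4; decide
  by_cases h5 : "COMPANY" = t
  · subst h5; decide
  by_cases h6 : "CREDIT_CARD" = t
  · subst h6; decide
  by_cases h7 : "NATIONAL_ID" = t
  · subst h7; decide
  by_cases h8 : "DATE_TIME" = t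
  · subst h8; decide
  simp [PySem.Dict.get?, pvPriorityB, List.idxOf?_cons,
    h1, h2, h3, h4, h5, h6, h7, h8]

lemma pvStepB_eq : pvStepB = pvStepN pvPriorityB := by
  funext acc t
  simp only [pvStepB, pvStepN, pvRank_get]

def pvAccOK (acc : Option Int) : Prop := ∀ a, acc = some a → 0 ≤ a

lemma pvStep_ok (P : List String) (acc : Option Int) (t : String) (h : pvAccOK acc) :
    pvAccOK (pvStepN P acc t) := by
  unfold pvStepN
  cases hi : (List.idxOf? t P) with
  | none => simpa using h
  | some r =>
    cases acc with
    | none => intro a ha; simp at ha; omega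
    | some b =>
      have hb := h b rfl
      intro a ha
      simp at ha
      split at ha <;> simp at ha <;> omega

lemma pvFold_ok (P : List String) (s : List String) (acc : Option Int) (h : pvAccOK acc) :
    pvAccOK (s.foldl (pvStepN P) acc) := by
  induction s generalizing acc with
  | nil => exact h
  | cons t ts ih => exact ih _ (pvStep_ok P acc t h)

lemma pvFold_keep0 (P : List String) (s : List String) :
    s.foldl (pvStepN P) (some 0) = some 0 := by
  induction s with
  | nil => rfl
  | cons t ts ih =>
    have : pvStepN P (some 0) t = some 0 := by
      unfold pvStepN
      cases hi : (List.idxOf? t P) with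
      | none => rfl
      | some r => simp
    rw [List.foldl_cons, this, ih]

lemma pvFold_mem0 (P : List String) (p : String) (s : List String) (acc : Option Int)
    (hp : p ∈ s) (h : pvAccOK acc) : s.foldl (pvStepN (p :: P)) acc = some 0 := by
  induction s generalizing acc with
  | nil => cases hp
  | cons t ts ih =>
    rw [List.foldl_cons]
    rcases List.mem_cons.mp hp with rfl | hmem
    · have hstep : pvStepN (p :: P) acc p = some 0 := by
        unfold pvStepN
        rw [List.idxOf?_cons]
        simp only [beq_self_eq_true, if_true, Option.map_some]
        cases acc with
        | none => rfl
        | some b =>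
          have hb := h b rfl
          show (if Int.ofNat 0 < b then some (Int.ofNat 0) else some b) = some 0
          have h0 : Int.ofNat 0 = 0 := rfl
          rw [h0]
          split_ifs with hc
          · rfl
          · have hb0 : b = 0 := by omega
            rw [hb0]
      rw [hstep, pvFold_keep0]
    · exact ih _ hmem (pvStep_ok _ acc t h)

lemma pvFold_shift (P : List String) (p : String) (s : List String) (acc : Option Int)
    (hp : p ∉ s) :
    s.foldl (pvStepN (p :: P)) (acc.map (· + 1)) = (s.foldl (pvStepN P) acc).map (· + 1) := by
  induction s generalizing acc with
  | nil => rfl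
  | cons t ts ih =>
    have htp : t ≠ p := fun h => hp (h ▸ List.mem_cons_self)
    have hts : p ∉ ts := fun h => hp (List.mem_cons_of_mem _ h)
    have hstep : pvStepN (p :: P) (acc.map (· + 1)) t = (pvStepN P acc t).map (· + 1) := by
      unfold pvStepN
      rw [List.idxOf?_cons]
      simp only [beq_iff_eq, Ne.symm htp, if_false]
      cases hi : (List.idxOf? t P) with
      | none => simp
      | some r =>
        have hsucc : Int.ofNat (r + 1) = Int.ofNat r + 1 := rfl
        cases acc with
        | none => simp
        | some b =>
          simp only [Option.map_some, hsucc]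
          split_ifs with hc1 hc2 hc2 <;> simp <;> omega
    rw [List.foldl_cons, List.foldl_cons, hstep, ih _ hts]

lemma pvGet_shift (p : String) (P : List String) (r : Int) (hr : 0 ≤ r) :
    PySem.List.pyGet? (p :: P) (r + 1) = PySem.List.pyGet? P r := by
  rw [PySem.List.pyGet?_of_nonneg _ (by omega), PySem.List.pyGet?_of_nonneg _ hr]
  have h1 : (r + 1).toNat = r.toNat + 1 := by omega
  rw [h1]
  simp

lemma pvMain (P : List String) (s : List String) :
    pvPickFirst P s = (s.foldl (pvStepN P) none).bind (fun b => PySem.List.pyGet? P b) := by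
  induction P generalizing s with
  | nil =>
    have hfold : ∀ (s : List String) (acc : Option Int), s.foldl (pvStepN []) acc = acc := by
      intro s
      induction s with
      | nil => intro acc; rfl
      | cons t ts ih => intro acc; rw [List.foldl_cons]; exact ih _
    simp [pvPickFirst, hfold]
  | cons p P ih =>
    by_cases hp : p ∈ s
    · rw [pvFold_mem0 P p s none hp (by intro a h; cases h)]
      simp [pvPickFirst, hp]
    · have hshift := pvFold_shift P p s none hp
      simp only [Option.map_none] at hshift
      rw [hshift]
      simp only [pvPickFirst, hp, if_false]
      rw [ih]
      cases hf : (s.foldl (pvStepN P) none) with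
      | none => rfl
      | some r =>
        have hr : 0 ≤ r := pvFold_ok P s none (by intro a h; cases h) r hf
        simp only [Option.map_some, Option.bind_some]
        exact (pvGet_shift p P r hr).symm

-- ===== VERDICT (by name: the statement is the Claim_ definition above) =====
theorem categorize_row_spec : Claim_equal_categorize_row := by
  intro row _
  unfold Spec_categorize_row categorize_row categorize_row_alt
  simp only []
  split
  · rfl
  · rw [pvStepB_eq]
    have hPA : pvPriorityA = pvPriorityB := rfl
    rw [hPA, pvMain]
    cases (PySem.Set.ofList (((PySem.Dict.mk row).getD "ground_truth" []).map Prod.fst)).foldl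
        (pvStepN pvPriorityB) none <;> rfl
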